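-- pv_equiv track=rewrite | github.com/Mitche-44/Python-demo | quiz7.py | solution
-- ===== SOURCE A (Python) =====
-- def solution(S):
--     i = 0
--     patches = 0
--     N = len(S)
--
--     while i < N:
--         if S[i] == 'X':
--             patches += 1
--             i += 3
--         else:
--             i += 1
--     return patches
-- ===== SOURCE B (Python) =====
-- def solution(S):
--     xs = [i for i, c in enumerate(S) if c == 'X']
--     patches = 0
--     next_free = 0
--     for idx in xs:
--         if idx >= next_free:
--             patches += 1
--             next_free = idx + 3
--     return patches
-- ===== Notes on version B (the rewrite author's own statement) =====
-- stated objective: alternative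
-- what changed: Replaced the cursor-jumping while loop with an index-collection pass (enumerate+filter of 'X' positions) followed by a watermark greedy sweep over only those positions.
import Mathlib
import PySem

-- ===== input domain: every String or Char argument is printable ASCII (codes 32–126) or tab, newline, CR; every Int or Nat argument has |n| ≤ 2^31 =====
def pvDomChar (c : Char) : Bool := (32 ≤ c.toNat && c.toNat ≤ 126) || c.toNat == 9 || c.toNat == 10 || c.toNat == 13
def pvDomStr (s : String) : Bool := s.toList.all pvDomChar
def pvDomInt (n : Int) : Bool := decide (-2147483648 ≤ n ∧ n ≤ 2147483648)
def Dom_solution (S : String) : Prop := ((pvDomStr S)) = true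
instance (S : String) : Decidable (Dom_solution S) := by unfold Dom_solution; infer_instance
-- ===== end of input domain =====

-- B is an alternative decomposition (index collection + watermark sweep) of the same O(n) greedy; return value only, no speed claim.

-- ===== PORT A =====
-- the while loop: at each cursor position, 'X' counts a patch and jumps the cursor by 3, otherwise by 1
def solutionLoop : List Char → Int
  | [] => 0
  | c :: rest => if c = 'X' then 1 + solutionLoop (rest.drop 2) else solutionLoop rest
  termination_by l => l.length
  decreasing_by all_goals simp

def solution (S : String) : Int := solutionLoop S.toList

-- ===== PORT B =====
-- [i for i, c in enumerate(S) if c == 'X'] with running offset k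
def solXidxs (k : Int) : List Char → List Int
  | [] => []
  | c :: rest => if c = 'X' then k :: solXidxs (k + 1) rest else solXidxs (k + 1) rest

-- body of the for loop over the collected indices: state (patches, next_free)
def solBstep (st : Int × Int) (idx : Int) : Int × Int :=
  if idx ≥ st.2 then (st.1 + 1, idx + 3) else st

def solution_alt (S : String) : Int :=
  ((solXidxs 0 S.toList).foldl solBstep (0, 0)).1

-- ===== PRECONDITION & SPEC =====
def Spec_solution (S : String) (out : Int) : Prop := out = solution_alt S
instance (S : String) (out : Int) : Decidable (Spec_solution S out) := by unfold Spec_solution; infer_instance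

-- ===== CLAIM (what is proved, stated in full; the proofs are below) =====
def Claim_equal_solution : Prop := ∀ (S : String), Dom_solution S → Spec_solution S (solution S)

-- ===== LEMMAS AND PROOFS =====

-- indices of a concatenation split at the concatenation point
lemma solXidxs_append (l₁ l₂ : List Char) : ∀ (k : Int),
    solXidxs k (l₁ ++ l₂) = solXidxs k l₁ ++ solXidxs (k + l₁.length) l₂ := by
  induction l₁ with
  | nil => intro k; simp [solXidxs]
  | cons c rest ih =>
      intro k
      simp only [List.cons_append, solXidxs, ih (k + 1), List.length_cons]
      push_cast
      ring_nf
      split_ifs <;> simp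

-- a fold over indices that are all below the watermark leaves the state unchanged
lemma solB_skip (l : List Char) : ∀ (k p nf : Int), k + l.length ≤ nf →
    (solXidxs k l).foldl solBstep (p, nf) = (p, nf) := by
  induction l with
  | nil => intro k p nf _; simp [solXidxs]
  | cons c rest ih =>
      intro k p nf h
      simp only [List.length_cons] at h
      push_cast at h
      have hk : ¬ (k ≥ nf) := by omega
      by_cases hc : c = 'X' <;>
        simp only [solXidxs, hc, if_true, if_false, List.foldl_cons, solBstep, hk] <;>
        exact ih (k + 1) p nf (by omega)

-- main invariant: with the watermark at or below the current offset, the sweep adds exactly A's count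
lemma solB_main : ∀ (n : Nat) (l : List Char), l.length = n → ∀ (k p nf : Int), nf ≤ k →
    ((solXidxs k l).foldl solBstep (p, nf)).1 = p + solutionLoop l := by
  intro n
  induction n using Nat.strong_induction_on with
  | _ n ih =>
    intro l hl k p nf hnf
    match l with
    | [] => simp [solXidxs, solutionLoop]
    | c :: rest =>
      by_cases hc : c = 'X'
      · have hge : k ≥ nf := by omega
        simp only [solXidxs, hc, if_true, List.foldl_cons, solBstep, if_pos hge, solutionLoop]
        rcases Nat.lt_or_ge rest.length 2 with h2 | h2
        · -- fewer than 2 chars remain: every remaining index is below the new watermark k+3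
          have hdrop : rest.drop 2 = [] := by
            apply List.eq_nil_of_length_eq_zero; simp; omega
          rw [solB_skip rest (k + 1) (p + 1) (k + 3) (by omega), hdrop]
          simp [solutionLoop]
        · -- split rest into the 2 skipped chars and the tail starting at offset k+3
          rw [show rest = rest.take 2 ++ rest.drop 2 from (List.take_append_drop 2 rest).symm,
              solXidxs_append, List.foldl_append]
          have htk : (List.take 2 rest).length = 2 := by simp; omega
          rw [solB_skip (rest.take 2) (k + 1) (p + 1) (k + 3) (by rw [htk]; omega)]
          have hlen : (rest.drop 2).length < n := by simp; simp at hl; omega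
          rw [ih _ hlen (rest.drop 2) rfl (k + 1 + (List.take 2 rest).length) (p + 1) (k + 3)
            (by rw [htk]; omega)]
          simp [List.take_append_drop]; ring
      · have hge : nf ≤ k + 1 := by omega
        simp only [solXidxs, hc, solutionLoop]
        exact ih (n - 1) (by simp at hl; omega) rest (by simp at hl; omega) (k + 1) p nf hge

-- ===== VERDICT (by name: the statement is the Claim_ definition above) =====
theorem solution_spec : Claim_equal_solution := by
  intro S _
  unfold Spec_solution solution solution_alt
  rw [solB_main S.toList.length S.toList rfl 0 0 0 le_rfl]
  ring
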